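-- pv_equiv track=rewrite | github.com/olivia-rippee/Python-for-Computational-Biology-and-Bioinformatics | Bioinformatics IV - Molecular Evolution/4 Peptide Sequencing.py | IdealSpectrum
-- ===== SOURCE A (Python) =====
-- def IdealSpectrum(peptide, massTable):
--     prefixMass = [0]
--     for aa in peptide:
--         prefixMass.append(prefixMass[-1] + massTable[aa])
--     spectrum = set(prefixMass)
--     peptideLength = len(peptide)
--     for i in range(peptideLength):
--         for j in range(i + 1, peptideLength + 1):
--             subpeptideMass = prefixMass[j] - prefixMass[i]
--             spectrum.add(subpeptideMass)
--     return sorted(spectrum)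
-- ===== SOURCE B (Python) =====
-- def IdealSpectrum(peptide, massTable):
--     masses = [massTable[aa] for aa in peptide]
--     spectrum = {0}
--     for i in range(len(masses)):
--         m = 0
--         for x in masses[i:]:
--             m += x
--             spectrum.add(m)
--     return sorted(spectrum)
-- ===== Notes on version B (the rewrite author's own statement) =====
-- stated objective: simpler
-- what changed: B drops A's prefix-mass table and index-difference double loop: it precomputes the residue masses once and, for each start position, accumulates a running sum over the suffix directly into the set seeded with {0}.
import Mathlib
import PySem

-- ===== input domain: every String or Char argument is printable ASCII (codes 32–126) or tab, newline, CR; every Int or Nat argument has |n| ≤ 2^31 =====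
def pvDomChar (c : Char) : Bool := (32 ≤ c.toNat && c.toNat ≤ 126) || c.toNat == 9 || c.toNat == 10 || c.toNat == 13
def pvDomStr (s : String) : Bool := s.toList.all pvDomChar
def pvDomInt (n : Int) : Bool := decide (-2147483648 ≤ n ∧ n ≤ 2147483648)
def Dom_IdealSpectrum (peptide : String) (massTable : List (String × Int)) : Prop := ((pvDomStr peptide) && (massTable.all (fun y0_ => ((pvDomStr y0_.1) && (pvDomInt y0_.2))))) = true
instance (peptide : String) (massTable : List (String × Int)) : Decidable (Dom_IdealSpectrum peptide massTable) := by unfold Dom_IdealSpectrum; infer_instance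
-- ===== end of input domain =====

-- B drops A's prefix-mass table: it accumulates each suffix's running sums directly into the set (simpler decomposition, same cost).


-- shared helper: massTable[aa] (first-match lookup in the association list; default 0 is unreachable under Pre_)
def massOf (massTable : List (String × Int)) (aa : String) : Int :=
  ((massTable.find? (fun p => p.1 == aa)).map Prod.snd).getD 0

-- ===== PORT A =====
def IdealSpectrum (peptide : String) (massTable : List (String × Int)) : List Int :=
  let prefixMass : List Int :=
    peptide.toList.foldl
      (fun pm c => pm ++ [pm.getLastD 0 + massOf massTable (String.singleton c)]) [0]
  let spectrum : PySem.Set Int := PySem.Set.ofList prefixMass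
  let peptideLength : Int := PySem.Str.len peptide
  let spectrum :=
    (PySem.List.pyRange 0 peptideLength 1).foldl
      (fun s i =>
        (PySem.List.pyRange (i + 1) (peptideLength + 1) 1).foldl
          (fun s j =>
            PySem.Set.add s (PySem.List.pyGetD prefixMass j 0 - PySem.List.pyGetD prefixMass i 0))
          s)
      spectrum
  PySem.List.sorted spectrum (fun x => x) false

-- ===== PORT B =====
def IdealSpectrum_alt (peptide : String) (massTable : List (String × Int)) : List Int :=
  let masses : List Int := peptide.toList.map (fun c => massOf massTable (String.singleton c))
  let spectrum : PySem.Set Int := PySem.Set.ofList [0]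
  let spectrum :=
    (PySem.List.pyRange 0 (PySem.List.len masses) 1).foldl
      (fun s i =>
        ((PySem.List.slice masses (some i) none).foldl
          (fun (p : Int × PySem.Set Int) x =>
            let m := p.1 + x
            (m, PySem.Set.add p.2 m))
          (0, s)).2)
      spectrum
  PySem.List.sorted spectrum (fun x => x) false

-- ===== PRECONDITION & SPEC =====
-- Pre_ excludes exactly the inputs where A raises KeyError: a peptide character absent from the mass table.
def Pre_IdealSpectrum (peptide : String) (massTable : List (String × Int)) : Prop :=
  peptide.toList.all (fun c => massTable.any (fun p => p.1 == String.singleton c)) = true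
instance (peptide : String) (massTable : List (String × Int)) : Decidable (Pre_IdealSpectrum peptide massTable) := by unfold Pre_IdealSpectrum; infer_instance

def pvWitness_IdealSpectrum : String × (List (String × Int)) := ("GAG", [("G", 57), ("A", 71)])

def Spec_IdealSpectrum (peptide : String) (massTable : List (String × Int)) (out : List Int) : Prop := out = IdealSpectrum_alt peptide massTable
instance (peptide : String) (massTable : List (String × Int)) (out : List Int) : Decidable (Spec_IdealSpectrum peptide massTable out) := by unfold Spec_IdealSpectrum; infer_instance

-- ===== CLAIM (what is proved, stated in full; the proofs are below) =====
def Claim_equal_IdealSpectrum : Prop := ∀ (peptide : String) (massTable : List (String × Int)), Dom_IdealSpectrum peptide massTable → Pre_IdealSpectrum peptide massTable → Spec_IdealSpectrum peptide massTable (IdealSpectrum peptide massTable)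

-- ===== LEMMAS AND PROOFS =====

-- running forward sums: sumsFrom s [x1,…,xk] = [s+x1, s+x1+x2, …]
def sumsFrom : Int → List Int → List Int
  | _, [] => []
  | s, x :: xs => (s + x) :: sumsFrom (s + x) xs

theorem sumsFrom_length (s : Int) (l : List Int) : (sumsFrom s l).length = l.length := by
  induction l generalizing s with
  | nil => rfl
  | cons x xs ih => simp [sumsFrom, ih]

-- A's prefix-mass fold builds 0 :: sumsFrom 0 (masses)
theorem foldl_prefix (g : Char → Int) (l : List Char) (acc : List Int) (hacc : acc ≠ []) :
    l.foldl (fun pm c => pm ++ [pm.getLastD 0 + g c]) acc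
      = acc ++ sumsFrom (acc.getLastD 0) (l.map g) := by
  induction l generalizing acc with
  | nil => simp [sumsFrom]
  | cons c cs ih =>
      simp only [List.foldl_cons, List.map_cons, sumsFrom]
      rw [ih _ (by simp)]
      simp

theorem sumsFrom_shift (s : Int) (l : List Int) (a : Int) :
    sumsFrom (a - s) l = (sumsFrom a l).map (fun v => v - s) := by
  induction l generalizing a with
  | nil => rfl
  | cons x xs ih =>
      simp only [sumsFrom, List.map_cons]
      rw [show a - s + x = a + x - s by ring, ih (a + x)]

theorem sumsFrom_drop (l : List Int) (s : Int) (i : Nat) (h : i ≤ l.length) :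
    sumsFrom ((s :: sumsFrom s l).getD i 0) (l.drop i) = (sumsFrom s l).drop i := by
  induction l generalizing s i with
  | nil =>
      simp at h
      subst h
      simp [sumsFrom]
  | cons x xs ih =>
      cases i with
      | zero => simp
      | succ k =>
          simp only [sumsFrom, List.drop_succ_cons, List.getD_cons_succ]
          exact ih (s + x) k (by simpa using h)

-- B's inner running-sum fold adds exactly sumsFrom m0 l to the set
theorem foldl_run (l : List Int) (m0 : Int) (acc : PySem.Set Int) :
    (l.foldl (fun (p : Int × PySem.Set Int) x =>
        let m := p.1 + x
        (m, PySem.Set.add p.2 m)) (m0, acc)).2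
      = (sumsFrom m0 l).foldl (fun a v => PySem.Set.add a v) acc := by
  induction l generalizing m0 acc with
  | nil => rfl
  | cons x xs ih => simp only [List.foldl_cons, sumsFrom]; exact ih (m0 + x) _

-- adding already-present elements is a no-op
theorem foldl_add_of_mem (l : List Int) (s : PySem.Set Int) (h : ∀ x ∈ l, x ∈ s) :
    l.foldl (fun a v => PySem.Set.add a v) s = s := by
  induction l generalizing s with
  | nil => rfl
  | cons x xs ih =>
      simp only [List.foldl_cons]
      rw [PySem.Set.add_of_mem (h x (by simp))]
      exact ih s (fun y hy => h y (by simp [hy]))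

-- the two loop bodies agree: A's prefix-difference pass over j = i+1..n equals B's running-sum pass over masses[i:]
theorem step_eq (ms : List Int) (i : Nat) (h : i ≤ ms.length) (s : PySem.Set Int) :
    (PySem.List.pyRange ((i : Int) + 1) ((ms.length : Int) + 1) 1).foldl
      (fun s j => PySem.Set.add s
        (PySem.List.pyGetD (0 :: sumsFrom 0 ms) j 0 - PySem.List.pyGetD (0 :: sumsFrom 0 ms) (i : Int) 0)) s
    = ((PySem.List.slice ms (some (i : Int)) none).foldl
        (fun (p : Int × PySem.Set Int) x =>
          let m := p.1 + x
          (m, PySem.Set.add p.2 m)) (0, s)).2 := by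
  set pm : List Int := 0 :: sumsFrom 0 ms with hpmdef
  have hpm : ((ms.length : Int) + 1) = PySem.List.len pm := by
    simp [PySem.List.len_eq, hpmdef, sumsFrom_length]
  set P : Int := PySem.List.pyGetD pm (i : Int) 0 with hP
  have hPget : P = pm.getD i 0 := by simp [hP]
  -- A side: fold over the dropped prefix list
  rw [hpm, show ((i : Int) + 1) = ((i + 1 : Nat) : Int) by push_cast; ring]
  rw [PySem.List.foldl_pyRange_pyGetD pm 0 (fun a v => PySem.Set.add a (v - P)) s (by positivity)]
  -- B side
  rw [PySem.List.slice_from_natCast, foldl_run]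
  have hshift : sumsFrom 0 (ms.drop i) = (sumsFrom P (ms.drop i)).map (fun v => v - P) := by
    have := sumsFrom_shift P (ms.drop i) P
    simpa using this
  have hdrop : sumsFrom P (ms.drop i) = (sumsFrom 0 ms).drop i := by
    rw [hPget]; exact sumsFrom_drop ms 0 i h
  rw [hshift, hdrop, List.foldl_map]
  simp [hpmdef]

-- the head iteration i = 0: A's start set (all prefix masses) equals B's {0} after B's first pass
theorem head_eq (ms : List Int) :
    ((PySem.List.slice ms (some (0 : Int)) none).foldl
        (fun (p : Int × PySem.Set Int) x =>
          let m := p.1 + x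
          (m, PySem.Set.add p.2 m)) (0, PySem.Set.ofList [(0 : Int)])).2
    = PySem.Set.ofList (0 :: sumsFrom 0 ms) := by
  have h0 : PySem.List.slice ms (some ((0 : Nat) : Int)) none = ms := by
    rw [PySem.List.slice_from_natCast]; simp
  rw [show ((0:Int)) = ((0 : Nat) : Int) by norm_num, h0, foldl_run]
  rw [PySem.Set.ofList_eq_foldl]
  rfl

theorem head_noop (ms : List Int) :
    ((PySem.List.slice ms (some (0 : Int)) none).foldl
        (fun (p : Int × PySem.Set Int) x =>
          let m := p.1 + x
          (m, PySem.Set.add p.2 m)) (0, PySem.Set.ofList (0 :: sumsFrom 0 ms))).2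
    = PySem.Set.ofList (0 :: sumsFrom 0 ms) := by
  have h0 : PySem.List.slice ms (some ((0 : Nat) : Int)) none = ms := by
    rw [PySem.List.slice_from_natCast]; simp
  rw [show ((0:Int)) = ((0 : Nat) : Int) by norm_num, h0, foldl_run]
  apply foldl_add_of_mem
  intro x hx
  rw [PySem.Set.mem_ofList]
  exact List.mem_cons_of_mem _ hx

-- whole-loop equality: both outer folds over i = 0..n-1, A from the prefix-mass set, B from {0}
theorem outer_eq (ms : List Int) :
    (PySem.List.pyRange 0 (ms.length : Int) 1).foldl
      (fun s i => (PySem.List.pyRange (i + 1) ((ms.length : Int) + 1) 1).foldl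
        (fun s j => PySem.Set.add s
          (PySem.List.pyGetD (0 :: sumsFrom 0 ms) j 0 - PySem.List.pyGetD (0 :: sumsFrom 0 ms) i 0)) s)
      (PySem.Set.ofList (0 :: sumsFrom 0 ms))
    = (PySem.List.pyRange 0 (ms.length : Int) 1).foldl
        (fun s i => ((PySem.List.slice ms (some i) none).foldl
          (fun (p : Int × PySem.Set Int) x =>
            let m := p.1 + x
            (m, PySem.Set.add p.2 m)) (0, s)).2)
        (PySem.Set.ofList [0]) := by
  have hext : ∀ (init : PySem.Set Int),
      (PySem.List.pyRange 0 (ms.length : Int) 1).foldl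
        (fun s i => (PySem.List.pyRange (i + 1) ((ms.length : Int) + 1) 1).foldl
          (fun s j => PySem.Set.add s
            (PySem.List.pyGetD (0 :: sumsFrom 0 ms) j 0 - PySem.List.pyGetD (0 :: sumsFrom 0 ms) i 0)) s)
        init
      = (PySem.List.pyRange 0 (ms.length : Int) 1).foldl
          (fun s i => ((PySem.List.slice ms (some i) none).foldl
            (fun (p : Int × PySem.Set Int) x =>
              let m := p.1 + x
              (m, PySem.Set.add p.2 m)) (0, s)).2)
          init := by
    intro init
    apply List.foldl_ext
    intro s i hi
    rw [PySem.List.mem_pyRange_one] at hi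
    obtain ⟨h0, hn⟩ := hi
    obtain ⟨k, rfl⟩ := Int.eq_ofNat_of_zero_le h0
    exact step_eq ms k (by exact_mod_cast hn.le) s
  rw [hext]
  cases ms with
  | nil => simp [sumsFrom]
  | cons x xs =>
      have hpos : (0 : Int) < (((x :: xs).length : Nat) : Int) := by
        simp
      rw [PySem.List.pyRange_one_cons hpos]
      simp only [List.foldl_cons]
      rw [head_eq, head_noop]

-- ===== VERDICT (by name: the statement is the Claim_ definition above) =====
theorem IdealSpectrum_spec : Claim_equal_IdealSpectrum := by
  intro peptide massTable _ _
  unfold Spec_IdealSpectrum IdealSpectrum IdealSpectrum_alt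
  rw [foldl_prefix (fun c => massOf massTable (String.singleton c)) peptide.toList [0] (by simp)]
  dsimp only
  simp only [List.getLastD, List.getLast_singleton, List.singleton_append, PySem.Str.len_eq, PySem.List.len_eq, List.length_map]
  congr 1
  simpa only [List.length_map] using outer_eq (List.map (fun c => massOf massTable (String.singleton c)) peptide.toList)
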